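-- pv_equiv track=rewrite | github.com/WitalyK/Python_Stepik | sberpars.py | seter
-- ===== SOURCE A (Python) =====
-- def seter(list_norm):
--     d = {}
--     for line in list_norm:
--         if d.get(line[0]):
--             if d[line[0]].get(line[1]):
--                 if d[line[0]][line[1]].get(line[2]):
--                     if d[line[0]][line[1]][line[2]].get(line[3]):
--                         d[line[0]][line[1]][line[2]][line[3]] += line[4]
--                     else:
--                         d[line[0]][line[1]][line[2]][line[3]] = line[4]
--                 else:
--                     d[line[0]][line[1]][line[2]] = {line[3]: line[4]}
--             else:
--                 d[line[0]][line[1]] = {line[2]: {line[3]: line[4]}}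
--         else:
--             d[line[0]] = {line[1]: {line[2]: {line[3]: line[4]}}}
--     return d
-- ===== SOURCE B (Python) =====
-- def seter(list_norm):
--     # group-by decomposition: bucket rows by each key column (first-occurrence order) and recurse
--     return _group0(list_norm)
--
-- def _buckets(rows, i):
--     b = {}
--     for r in rows:
--         b.setdefault(r[i], []).append(r)
--     return b
--
-- def _group0(rows):
--     return {k: _group1(g) for k, g in _buckets(rows, 0).items()}
--
-- def _group1(rows):
--     return {k: _group2(g) for k, g in _buckets(rows, 1).items()}
--
-- def _group2(rows):
--     return {k: _leaf(g) for k, g in _buckets(rows, 2).items()}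
--
-- def _leaf(rows):
--     out = {}
--     for r in rows:
--         out[r[3]] = out.get(r[3], "") + r[4]
--     return out
-- ===== Notes on version B (the rewrite author's own statement) =====
-- stated objective: simpler
-- what changed: Replaces the 4-deep nested-if in-place dict mutation with a recursive group-by: bucket the rows by each key column in first-occurrence order, recurse per bucket, and concatenate the values at the leaf.
import Mathlib
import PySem

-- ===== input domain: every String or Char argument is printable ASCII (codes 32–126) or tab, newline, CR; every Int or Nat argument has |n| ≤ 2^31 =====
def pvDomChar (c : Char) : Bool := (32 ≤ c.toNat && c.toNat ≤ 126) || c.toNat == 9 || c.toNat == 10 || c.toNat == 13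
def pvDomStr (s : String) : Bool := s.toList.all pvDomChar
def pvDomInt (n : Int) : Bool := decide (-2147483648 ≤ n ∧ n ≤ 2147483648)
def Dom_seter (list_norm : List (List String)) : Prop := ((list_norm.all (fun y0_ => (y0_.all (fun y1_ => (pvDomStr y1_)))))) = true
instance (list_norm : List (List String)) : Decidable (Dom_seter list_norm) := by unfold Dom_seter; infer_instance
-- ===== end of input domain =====

-- B rebuilds A's nested summing dict by a recursive group-by over the key columns (simpler decomposition);
-- lines shorter than 5 raise IndexError in Python A and are excluded by Pre_seter.

-- ===== PORT A =====
-- one iteration of A's loop; the `≠ empty` tests are Python's truthiness of `d.get(...)`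
-- (get of a missing key returns None, falsy, exactly like the empty dict that getD's default conflates it with)
def seterStep (d : PySem.Dict String (PySem.Dict String (PySem.Dict String (PySem.Dict String String))))
    (line : List String) :
    PySem.Dict String (PySem.Dict String (PySem.Dict String (PySem.Dict String String))) :=
  match line with
  | k0 :: k1 :: k2 :: k3 :: v :: _ =>
    let m0 := d.getD k0 PySem.Dict.empty
    if m0 ≠ PySem.Dict.empty then
      let m1 := m0.getD k1 PySem.Dict.empty
      if m1 ≠ PySem.Dict.empty then
        let m2 := m1.getD k2 PySem.Dict.empty
        if m2 ≠ PySem.Dict.empty then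
          let s := m2.getD k3 ""
          if s ≠ "" then
            d.insert k0 (m0.insert k1 (m1.insert k2 (m2.insert k3 (s ++ v))))
          else
            d.insert k0 (m0.insert k1 (m1.insert k2 (m2.insert k3 v)))
        else
          d.insert k0 (m0.insert k1 (m1.insert k2 (PySem.Dict.ofList [(k3, v)])))
      else
        d.insert k0 (m0.insert k1 (PySem.Dict.ofList [(k2, PySem.Dict.ofList [(k3, v)])]))
    else
      d.insert k0 (PySem.Dict.ofList [(k1, PySem.Dict.ofList [(k2, PySem.Dict.ofList [(k3, v)])])])
  | _ => d  -- a line shorter than 5 raises IndexError in Python: outside Pre_seter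

def seter (list_norm : List (List String)) : List (String × List (String × List (String × List (String × String)))) :=
  (list_norm.foldl seterStep PySem.Dict.empty).items.map
    (fun p => (p.1, p.2.items.map (fun q => (q.1, q.2.items.map (fun r => (r.1, r.2.items))))))

-- ===== PORT B =====
-- b.setdefault(r[i], []).append(r)  ==  modify r[i] [] (· ++ [r])
def pvBuckets (i : Nat) (rows : List (List String)) : PySem.Dict String (List (List String)) :=
  rows.foldl (fun b r => b.modify (r.getD i "") [] (fun g => g ++ [r])) PySem.Dict.empty

-- out[r[3]] = out.get(r[3], "") + r[4]
def pvLeaf (rows : List (List String)) : List (String × String) :=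
  (rows.foldl (fun out r => out.modify (r.getD 3 "") "" (fun s => s ++ r.getD 4 "")) PySem.Dict.empty).items

def pvGroup2 (rows : List (List String)) : List (String × List (String × String)) :=
  (pvBuckets 2 rows).items.map (fun p => (p.1, pvLeaf p.2))

def pvGroup1 (rows : List (List String)) : List (String × List (String × List (String × String))) :=
  (pvBuckets 1 rows).items.map (fun p => (p.1, pvGroup2 p.2))

def seter_alt (list_norm : List (List String)) : List (String × List (String × List (String × List (String × String)))) :=
  (pvBuckets 0 list_norm).items.map (fun p => (p.1, pvGroup1 p.2))

-- ===== PRECONDITION & SPEC =====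
-- exactly the inputs on which A returns: every line must have at least five elements (else line[0..4] raises IndexError)
def Pre_seter (list_norm : List (List String)) : Prop := ∀ line ∈ list_norm, 5 ≤ line.length
instance (list_norm : List (List String)) : Decidable (Pre_seter list_norm) := by unfold Pre_seter; infer_instance

def pvWitness_seter : List (List String) := [["a", "b", "c", "d", "e"], ["a", "b", "x", "d", "f"]]

def Spec_seter (list_norm : List (List String)) (out : List (String × List (String × List (String × List (String × String))))) : Prop := out = seter_alt list_norm
instance (list_norm : List (List String)) (out : List (String × List (String × List (String × List (String × String))))) : Decidable (Spec_seter list_norm out) := by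
  unfold Spec_seter
  letI i2 : DecidableEq (List (String × List (String × List (String × String)))) := List.hasDecEq
  letI i1 : DecidableEq (String × List (String × List (String × List (String × String)))) := instDecidableEqProd
  exact List.hasDecEq out (seter_alt list_norm)

-- ===== CLAIM (what is proved, stated in full; the proofs are below) =====
def Claim_equal_seter : Prop := ∀ (list_norm : List (List String)), Dom_seter list_norm → Pre_seter list_norm → Spec_seter list_norm (seter list_norm)

-- ===== LEMMAS AND PROOFS =====

-- A's loop body, collapsed to a chain of Dict.modify along the key path (proved equal below on long-enough lines)
def pvBody3 (m : PySem.Dict String String) (l : List String) : PySem.Dict String String :=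
  m.modify (l.getD 3 "") "" (fun s => s ++ l.getD 4 "")
def pvBody2 (m : PySem.Dict String (PySem.Dict String String)) (l : List String) :
    PySem.Dict String (PySem.Dict String String) :=
  m.modify (l.getD 2 "") PySem.Dict.empty (fun m3 => pvBody3 m3 l)
def pvBody1 (m : PySem.Dict String (PySem.Dict String (PySem.Dict String String))) (l : List String) :
    PySem.Dict String (PySem.Dict String (PySem.Dict String String)) :=
  m.modify (l.getD 1 "") PySem.Dict.empty (fun m2 => pvBody2 m2 l)
def pvBody0 (d : PySem.Dict String (PySem.Dict String (PySem.Dict String (PySem.Dict String String)))) (l : List String) :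
    PySem.Dict String (PySem.Dict String (PySem.Dict String (PySem.Dict String String))) :=
  d.modify (l.getD 0 "") PySem.Dict.empty (fun m1 => pvBody1 m1 l)

lemma pvStep_collapse (d : PySem.Dict String (PySem.Dict String (PySem.Dict String (PySem.Dict String String))))
    (l : List String) (hl : 5 ≤ l.length) : seterStep d l = pvBody0 d l := by
  rcases l with _ | ⟨k0, _ | ⟨k1, _ | ⟨k2, _ | ⟨k3, _ | ⟨v, rest⟩⟩⟩⟩⟩
  · simp at hl
  · simp at hl
  · simp at hl
  · simp at hl
  · simp at hl
  · simp only [seterStep, pvBody0, pvBody1, pvBody2, pvBody3, PySem.Dict.modify,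
      List.getD_cons_zero, List.getD_cons_succ]
    split_ifs with h0 h1 h2 h3 <;>
      simp_all [PySem.Dict.ofList, PySem.Dict.update, PySem.Dict.getD_empty]

-- getD of a keyed modify-fold: the value at k is the fold of g over the rows whose key is k
lemma pv_getD_foldl_modify_key {κ ν β : Type} [BEq κ] [LawfulBEq κ] [DecidableEq κ]
    (key : β → κ) (d0 : ν) (g : ν → β → ν) (l : List β) (d : PySem.Dict κ ν) (k : κ) :
    (l.foldl (fun d x => d.modify (key x) d0 (fun m => g m x)) d).getD k d0
      = (l.filter (fun x => key x == k)).foldl g (d.getD k d0) := by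
  induction l generalizing d with
  | nil => simp
  | cons x xs ih =>
    simp only [List.foldl_cons, List.filter_cons]
    rw [ih]
    by_cases h : key x = k
    · simp [h]
    · have h' : k ≠ key x := fun e => h e.symm
      simp [h, PySem.Dict.getD_modify, h']

-- items of a keyed modify-fold from the empty dict: keys in first-occurrence order, values the per-key folds
lemma pv_items_foldl_modify_key {κ ν β : Type} [BEq κ] [LawfulBEq κ] [DecidableEq κ]
    (key : β → κ) (d0 : ν) (g : ν → β → ν) (l : List β) :
    (l.foldl (fun d x => d.modify (key x) d0 (fun m => g m x)) PySem.Dict.empty).items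
      = (PySem.Set.ofList (l.map key)).map (fun k => (k, (l.filter (fun x => key x == k)).foldl g d0)) := by
  have hnd : (l.foldl (fun d x => d.modify (key x) d0 (fun m => g m x)) PySem.Dict.empty).keys.Nodup :=
    PySem.Dict.nodup_keys_foldl_modify_key l key d0 (fun _ x m => g m x) PySem.Dict.empty (by simp)
  rw [PySem.Dict.items_eq_map_keys _ hnd d0, PySem.Dict.keys_foldl_modify_key]
  rw [PySem.Dict.keys_empty, PySem.Set.update_nil_left]
  refine List.map_congr_left ?_
  intro k hk
  rw [pv_getD_foldl_modify_key]
  simp [PySem.Dict.getD_empty]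

-- leaf level: A's per-key fold IS B's leaf loop
lemma pvT3 (rows : List (List String)) :
    (rows.foldl pvBody3 PySem.Dict.empty).items = pvLeaf rows := rfl

-- the bucket items: keys in first-occurrence order, each paired with its rows
lemma pvBuckets_items (i : Nat) (rows : List (List String)) :
    (pvBuckets i rows).items
      = (PySem.Set.ofList (rows.map (fun l => l.getD i ""))).map
          (fun k => (k, rows.filter (fun l => l.getD i "" == k))) := by
  unfold pvBuckets
  rw [pv_items_foldl_modify_key (fun l => l.getD i "") [] (fun g r => g ++ [r]) rows]
  refine List.map_congr_left ?_
  intro k hk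
  rw [PySem.List.foldl_append_singleton_eq_self]
  simp

lemma pvT2 (rows : List (List String)) :
    (rows.foldl pvBody2 PySem.Dict.empty).items.map (fun p => (p.1, p.2.items)) = pvGroup2 rows := by
  unfold pvGroup2
  rw [pvBuckets_items]
  rw [show (rows.foldl pvBody2 PySem.Dict.empty)
        = rows.foldl (fun d x => d.modify (x.getD 2 "") PySem.Dict.empty (fun m => pvBody3 m x)) PySem.Dict.empty from rfl]
  rw [pv_items_foldl_modify_key (fun l => l.getD 2 "") PySem.Dict.empty pvBody3 rows]
  rw [List.map_map, List.map_map]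
  refine List.map_congr_left ?_
  intro k hk
  exact congrArg (fun y => (k, y)) (pvT3 _)

lemma pvT1 (rows : List (List String)) :
    (rows.foldl pvBody1 PySem.Dict.empty).items.map
        (fun p => (p.1, p.2.items.map (fun q => (q.1, q.2.items)))) = pvGroup1 rows := by
  unfold pvGroup1
  rw [pvBuckets_items]
  rw [show (rows.foldl pvBody1 PySem.Dict.empty)
        = rows.foldl (fun d x => d.modify (x.getD 1 "") PySem.Dict.empty (fun m => pvBody2 m x)) PySem.Dict.empty from rfl]
  rw [pv_items_foldl_modify_key (fun l => l.getD 1 "") PySem.Dict.empty pvBody2 rows]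
  rw [List.map_map, List.map_map]
  refine List.map_congr_left ?_
  intro k hk
  exact congrArg (fun y => (k, y)) (pvT2 _)

lemma pvT0 (rows : List (List String)) :
    (rows.foldl pvBody0 PySem.Dict.empty).items.map
        (fun p => (p.1, p.2.items.map (fun q => (q.1, q.2.items.map (fun r => (r.1, r.2.items))))))
      = seter_alt rows := by
  unfold seter_alt
  rw [pvBuckets_items]
  rw [show (rows.foldl pvBody0 PySem.Dict.empty)
        = rows.foldl (fun d x => d.modify (x.getD 0 "") PySem.Dict.empty (fun m => pvBody1 m x)) PySem.Dict.empty from rfl]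
  rw [pv_items_foldl_modify_key (fun l => l.getD 0 "") PySem.Dict.empty pvBody1 rows]
  rw [List.map_map, List.map_map]
  refine List.map_congr_left ?_
  intro k hk
  exact congrArg (fun y => (k, y)) (pvT1 _)

theorem seter_spec : Claim_equal_seter := by
  intro rows _ hpre
  unfold Spec_seter seter
  have hfold : List.foldl seterStep PySem.Dict.empty rows = List.foldl pvBody0 PySem.Dict.empty rows :=
    PySem.List.foldl_congr_mem rows seterStep pvBody0 PySem.Dict.empty (fun acc x hx => pvStep_collapse acc x (hpre x hx))
  rw [hfold]
  exact pvT0 rows
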